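-- pv_equiv track=rewrite | github.com/rahulbahri/sigint-v2 | backend/routers/forecast.py | _build_deduped_causal_map
-- ===== SOURCE A (Python) =====
-- _CAUSAL_RELATION_PRIORITY = {
--     'CAUSES': 3, 'INFLUENCES': 2, 'LEADS': 2,
--     'CORRELATES_WITH': 1, 'ANTI_CORRELATES': 1,
-- }
--
-- def _build_deduped_causal_map(causal_pairs, kpis):
--     best = {}
--     for src, tgt, strength, direction, relation in causal_pairs:
--         if src in kpis and tgt in kpis:
--             key      = (tgt, src)
--             priority = _CAUSAL_RELATION_PRIORITY.get(relation, 0)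
--             if key not in best or priority > best[key][2]:
--                 best[key] = (strength, direction, priority)
--     causal_map = {}
--     for (tgt, src), (strength, direction, _) in best.items():
--         causal_map.setdefault(tgt, []).append((src, strength, direction))
--     return causal_map
-- ===== SOURCE B (Python) =====
-- _CAUSAL_RELATION_PRIORITY = {
--     'CAUSES': 3, 'INFLUENCES': 2, 'LEADS': 2,
--     'CORRELATES_WITH': 1, 'ANTI_CORRELATES': 1,
-- }
--
-- def _build_deduped_causal_map(causal_pairs, kpis):
--     # Declarative re-derivation: filter once, list distinct (tgt, src) keys in
--     # first-appearance order, pick each key's winner as the first entry whose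
--     # priority equals the key's maximum priority, then group by distinct tgt.
--     filt = [(t, s, st, d, _CAUSAL_RELATION_PRIORITY.get(r, 0))
--             for (s, t, st, d, r) in causal_pairs if s in kpis and t in kpis]
--     keys = []
--     for (t, s, _st, _d, _p) in filt:
--         if (t, s) not in keys:
--             keys.append((t, s))
--
--     def winner(t, s):
--         entries = [(st, d, p) for (t2, s2, st, d, p) in filt
--                    if t2 == t and s2 == s]
--         m = max(p for (_st, _d, p) in entries)
--         st, d, _p = next(e for e in entries if e[2] == m)
--         return (st, d)
--
--     tgts = []
--     for (t, _s) in keys: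
--         if t not in tgts:
--             tgts.append(t)
--     return {t: [(s,) + winner(t, s) for (t2, s) in keys if t2 == t]
--             for t in tgts}
-- ===== Notes on version B (the rewrite author's own statement) =====
-- stated objective: alternative
-- what changed: Replaces A's two dict-accumulation passes (a best-by-key dict updated in place, then regrouped into the output dict) with a declarative derivation: filter once, list the distinct (tgt,src) keys in first-appearance order, pick each key's winner as the first entry attaining that key's maximum priority, and build the grouped map by a comprehension over the distinct tgts.
import Mathlib
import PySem

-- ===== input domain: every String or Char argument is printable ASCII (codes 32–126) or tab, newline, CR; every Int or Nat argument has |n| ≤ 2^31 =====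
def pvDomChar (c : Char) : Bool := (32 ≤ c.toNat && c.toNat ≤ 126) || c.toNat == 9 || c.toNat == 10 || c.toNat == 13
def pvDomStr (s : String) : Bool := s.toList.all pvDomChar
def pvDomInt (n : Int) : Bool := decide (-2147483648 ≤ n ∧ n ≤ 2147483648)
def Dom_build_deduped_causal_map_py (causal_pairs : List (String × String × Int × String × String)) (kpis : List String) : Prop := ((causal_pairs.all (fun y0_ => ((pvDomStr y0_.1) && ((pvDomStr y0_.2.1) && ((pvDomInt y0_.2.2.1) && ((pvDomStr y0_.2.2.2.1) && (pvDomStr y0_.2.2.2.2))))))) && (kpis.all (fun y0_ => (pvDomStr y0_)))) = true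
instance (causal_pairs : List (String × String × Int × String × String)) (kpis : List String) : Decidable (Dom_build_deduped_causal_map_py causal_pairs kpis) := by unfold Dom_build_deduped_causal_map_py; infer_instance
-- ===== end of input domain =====

-- B replaces A's two dict-accumulation passes by a declarative derivation (filter once,
-- distinct keys in first-appearance order, per-key winner = first entry attaining the key's
-- maximum priority, group by distinct tgt); objective: alternative, same results everywhere.

-- ===== PORT A =====

-- the module constant _CAUSAL_RELATION_PRIORITY (shared by both Pythons)
def pvPrio : PySem.Dict String Int :=
  PySem.Dict.ofList [("CAUSES", 3), ("INFLUENCES", 2), ("LEADS", 2),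
                     ("CORRELATES_WITH", 1), ("ANTI_CORRELATES", 1)]

-- the inner dedup update of A's first loop: `if key not in best or priority > best[key][2]: best[key] = …`
-- (entry e = (tgt, src, strength, direction, priority))
def pvBStep (b : PySem.Dict (String × String) (Int × String × Int))
    (e : String × String × Int × String × Int) : PySem.Dict (String × String) (Int × String × Int) :=
  match b.get? (e.1, e.2.1) with
  | none => b.insert (e.1, e.2.1) (e.2.2.1, e.2.2.2.1, e.2.2.2.2)
  | some v => if e.2.2.2.2 > v.2.2 then b.insert (e.1, e.2.1) (e.2.2.1, e.2.2.2.1, e.2.2.2.2) else b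

def build_deduped_causal_map_py (causal_pairs : List (String × String × Int × String × String)) (kpis : List String) : List (String × List (String × Int × String)) :=
  let best := causal_pairs.foldl
    (fun b p =>
      if kpis.contains p.1 && kpis.contains p.2.1 then
        pvBStep b (p.2.1, p.1, p.2.2.1, p.2.2.2.1, pvPrio.getD p.2.2.2.2 0)
      else b)
    PySem.Dict.empty
  let causal_map := best.items.foldl
    (fun (m : PySem.Dict String (List (String × Int × String))) it =>
      m.modify it.1.1 [] (· ++ [(it.1.2, it.2.1, it.2.2.1)]))
    PySem.Dict.empty
  causal_map.items

-- ===== PORT B =====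

-- the filtered comprehension `filt` (entries (tgt, src, strength, direction, priority))
def pvFilt (causal_pairs : List (String × String × Int × String × String)) (kpis : List String) : List (String × String × Int × String × Int) :=
  causal_pairs.filterMap (fun p =>
    if kpis.contains p.1 && kpis.contains p.2.1 then
      some (p.2.1, p.1, p.2.2.1, p.2.2.2.1, pvPrio.getD p.2.2.2.2 0)
    else none)

-- Source B's `winner`: first entry of the key's group whose priority equals the group maximum
-- (the `(0, "")` branches are totality guards only: `winner` is called only for keys of `filt`,
-- whose group is nonempty, where Python's max/next cannot raise)
def pvWinner (filt : List (String × String × Int × String × Int)) (t s : String) : Int × String :=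
  let entries := (filt.filter (fun e => e.1 == t && e.2.1 == s)).map
    (fun e => (e.2.2.1, e.2.2.2.1, e.2.2.2.2))
  match PySem.List.max? (entries.map (fun e => e.2.2)) (fun y => y) with
  | none => (0, "")
  | some m =>
    match entries.find? (fun e => e.2.2 == m) with
    | none => (0, "")
    | some e => (e.1, e.2.1)

def build_deduped_causal_map_py_alt (causal_pairs : List (String × String × Int × String × String)) (kpis : List String) : List (String × List (String × Int × String)) :=
  let filt := pvFilt causal_pairs kpis
  let keys : List (String × String) := PySem.Set.ofList (filt.map (fun e => (e.1, e.2.1)))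
  let tgts : List String := PySem.Set.ofList (keys.map (fun k => k.1))
  tgts.map (fun t =>
    (t, (keys.filter (fun k => k.1 == t)).map (fun k =>
      let w := pvWinner filt t k.2
      (k.2, w.1, w.2))))

-- ===== PRECONDITION & SPEC =====
def Spec_build_deduped_causal_map_py (causal_pairs : List (String × String × Int × String × String)) (kpis : List String) (out : List (String × List (String × Int × String))) : Prop := out = build_deduped_causal_map_py_alt causal_pairs kpis
instance (causal_pairs : List (String × String × Int × String × String)) (kpis : List String) (out : List (String × List (String × Int × String))) : Decidable (Spec_build_deduped_causal_map_py causal_pairs kpis out) := by unfold Spec_build_deduped_causal_map_py; infer_instance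

-- ===== CLAIM (what is proved, stated in full; the proofs are below) =====
def Claim_equal_build_deduped_causal_map_py : Prop := ∀ (causal_pairs : List (String × String × Int × String × String)) (kpis : List String), Dom_build_deduped_causal_map_py causal_pairs kpis → Spec_build_deduped_causal_map_py causal_pairs kpis (build_deduped_causal_map_py causal_pairs kpis)

-- ===== LEMMAS AND PROOFS =====

-- `(strength, direction, priority)` of an entry
def pvVal (e : String × String × Int × String × Int) : Int × String × Int := (e.2.2.1, e.2.2.2.1, e.2.2.2.2)
-- `(tgt, src)` of an entry
def pvKey (e : String × String × Int × String × Int) : String × String := (e.1, e.2.1)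
-- A's dedup update on values
def pvUpd (v : Int × String × Int) (w : Int × String × Int) : Int × String × Int :=
  if w.2.2 > v.2.2 then w else v
-- first-maximum accumulation over a key's group
def pvFM (g : List (String × String × Int × String × Int)) : Option (Int × String × Int) :=
  match g with
  | [] => none
  | e :: es => some ((es.map pvVal).foldl pvUpd (pvVal e))

theorem pv_foldA_eq_foldFilt (causal_pairs : List (String × String × Int × String × String)) (kpis : List String)
    (b : PySem.Dict (String × String) (Int × String × Int)) :
    causal_pairs.foldl
      (fun b p =>
        if kpis.contains p.1 && kpis.contains p.2.1 then
          pvBStep b (p.2.1, p.1, p.2.2.1, p.2.2.2.1, pvPrio.getD p.2.2.2.2 0)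
        else b) b
    = (pvFilt causal_pairs kpis).foldl pvBStep b := by
  induction causal_pairs generalizing b with
  | nil => rfl
  | cons p ps ih =>
    simp only [List.foldl_cons, pvFilt, List.filterMap_cons]
    by_cases h : (kpis.contains p.1 && kpis.contains p.2.1) = true
    · simp only [if_pos h]
      exact ih _
    · simp only [if_neg h]
      exact ih _

theorem pv_fm_append (g : List (String × String × Int × String × Int)) (e : String × String × Int × String × Int) :
    pvFM (g ++ [e]) = some (match pvFM g with
      | none => pvVal e
      | some v => pvUpd v (pvVal e)) := by
  cases g with
  | nil => rfl
  | cons e0 es => simp [pvFM]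

theorem pv_get?_foldBStep (l : List (String × String × Int × String × Int)) (k : String × String) :
    ((l.foldl pvBStep PySem.Dict.empty).get? k) = pvFM (l.filter (fun e => pvKey e == k)) := by
  induction l using List.reverseRecOn with
  | nil => simp [pvFM, PySem.Dict.get?_empty]
  | append_singleton l e ih =>
    rw [List.foldl_append, List.foldl_cons, List.foldl_nil, List.filter_append]
    by_cases he : (pvKey e == k) = true
    · have hscr : (e.1, e.2.1) = k := eq_of_beq he
      rw [List.filter_cons, List.filter_nil, if_pos he, pv_fm_append, ← ih]
      set B := l.foldl pvBStep PySem.Dict.empty with hB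
      unfold pvBStep
      cases hg : B.get? (e.1, e.2.1) with
      | none =>
        have hgk : B.get? k = none := hscr ▸ hg
        rw [hgk]
        simp only []
        rw [← hscr, PySem.Dict.get?_insert_self]
        simp [pvVal]
      | some v =>
        have hgk : B.get? k = some v := hscr ▸ hg
        rw [hgk]
        simp only []
        simp only [pvUpd, pvVal]
        by_cases hp : e.2.2.2.2 > v.2.2
        · rw [if_pos hp, if_pos hp, ← hscr, PySem.Dict.get?_insert_self]
        · rw [if_neg hp, if_neg hp, hgk]
    · have hk' : k ≠ (e.1, e.2.1) := by
        intro h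
        exact he (by rw [show pvKey e = k from h.symm]; exact beq_self_eq_true _)
      rw [List.filter_cons, List.filter_nil, if_neg he, List.append_nil, ← ih]
      set B := l.foldl pvBStep PySem.Dict.empty with hB
      unfold pvBStep
      cases hg : B.get? (e.1, e.2.1) with
      | none =>
        simp only []
        rw [PySem.Dict.get?_insert_of_ne _ _ hk']
      | some v =>
        simp only []
        by_cases hp : e.2.2.2.2 > v.2.2
        · rw [if_pos hp, PySem.Dict.get?_insert_of_ne _ _ hk']
        · rw [if_neg hp]

theorem pv_keys_foldBStep (l : List (String × String × Int × String × Int)) :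
    (l.foldl pvBStep PySem.Dict.empty).keys = PySem.Set.ofList (l.map pvKey) := by
  induction l using List.reverseRecOn with
  | nil => simp [PySem.Set.ofList_nil, PySem.Dict.keys_empty]
  | append_singleton l e ih =>
    rw [List.foldl_append, List.foldl_cons, List.foldl_nil, List.map_append, List.map_cons,
      List.map_nil, PySem.Set.ofList_append, PySem.Set.update_cons, PySem.Set.update_nil, ← ih]
    set B := l.foldl pvBStep PySem.Dict.empty with hB
    unfold pvBStep
    by_cases hc : B.contains (e.1, e.2.1) = true
    · have hm : pvKey e ∈ B.keys := (PySem.Dict.contains_iff_mem_keys _ _).mp hc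
      rw [PySem.Set.add_of_mem hm]
      cases hg : B.get? (e.1, e.2.1) with
      | none =>
        exfalso
        exact absurd hg ((PySem.Dict.get?_eq_none_iff_contains _ _).not.mpr (by simp [hc]))
      | some v =>
        simp only []
        by_cases hp : e.2.2.2.2 > v.2.2
        · rw [if_pos hp, PySem.Dict.keys_insert_of_contains _ _ hc]
        · rw [if_neg hp]
    · have hcf : B.contains (e.1, e.2.1) = false := by
        cases h' : B.contains (e.1, e.2.1) <;> simp_all
      have hm : pvKey e ∉ B.keys := fun h =>
        hc ((PySem.Dict.contains_iff_mem_keys _ _).mpr h)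
      rw [PySem.Set.add_of_not_mem hm]
      cases hg : B.get? (e.1, e.2.1) with
      | none =>
        simp only []
        rw [PySem.Dict.keys_insert_of_not_contains _ _ hcf]
        simp [pvKey]
      | some v =>
        exfalso
        have := (PySem.Dict.get?_eq_none_iff_contains _ _).mpr hcf
        simp [hg] at this

-- running first-max: the priority of the fold is the running maximum
theorem pv_fm_priority (es : List (Int × String × Int)) (v0 : Int × String × Int) :
    (es.foldl pvUpd v0).2.2 = es.foldl (fun a w => max a w.2.2) v0.2.2 := by
  induction es generalizing v0 with
  | nil => rfl
  | cons w ws ih =>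
    simp only [List.foldl_cons, ih]
    congr 1
    simp only [pvUpd]
    split <;> omega

theorem pv_fm_dominates (es : List (Int × String × Int)) (v0 : Int × String × Int) :
    ∀ v ∈ v0 :: es, v.2.2 ≤ (es.foldl pvUpd v0).2.2 := by
  induction es using List.reverseRecOn with
  | nil => intro v hv; simp only [List.mem_cons, List.not_mem_nil, or_false] at hv; simp [hv]
  | append_singleton es w ih =>
    intro v hv
    rw [List.foldl_append, List.foldl_cons, List.foldl_nil]
    have hsplit : v ∈ v0 :: es ∨ v = w := by
      rcases List.mem_cons.mp hv with h | h
      · exact Or.inl (by simp [h])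
      · rcases List.mem_append.mp h with h' | h'
        · exact Or.inl (List.mem_cons_of_mem _ h')
        · exact Or.inr (by simpa using h')
    simp only [pvUpd]
    rcases hsplit with h | h
    · have := ih v h
      split <;> omega
    · subst h
      split <;> omega

theorem pvUpd_eq (v w : Int × String × Int) : pvUpd v w = if w.2.2 > v.2.2 then w else v := rfl

-- the fold result is the FIRST element attaining the maximum priority
theorem pv_fm_find (es : List (Int × String × Int)) (v0 : Int × String × Int) :
    (v0 :: es).find? (fun v => v.2.2 == (es.foldl pvUpd v0).2.2) = some (es.foldl pvUpd v0) := by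
  induction es using List.reverseRecOn with
  | nil => simp [List.find?]
  | append_singleton es w ih =>
    rw [List.foldl_append, List.foldl_cons, List.foldl_nil]
    have hdom := pv_fm_dominates es v0
    generalize hF : es.foldl pvUpd v0 = F at ih hdom ⊢
    rw [pvUpd_eq]
    have hcons : v0 :: (es ++ [w]) = (v0 :: es) ++ [w] := by simp
    rw [hcons, List.find?_append]
    by_cases hp : w.2.2 > F.2.2
    · rw [if_pos hp]
      have hnone : (v0 :: es).find? (fun v => v.2.2 == w.2.2) = none := by
        rw [List.find?_eq_none]
        intro v hv
        have := hdom v hv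
        simp only [beq_iff_eq]
        omega
      rw [hnone]
      simp [List.find?]
    · rw [if_neg hp, ih]
      rfl

-- Source B's winner on a key of `filt` is A's fold value for that key
theorem pv_winner_eq (filt : List (String × String × Int × String × Int)) (t s : String)
    (h : ∃ e ∈ filt, pvKey e = (t, s)) :
    pvWinner filt t s =
      (((pvFM (filt.filter (fun e => pvKey e == (t, s)))).getD (0, "", 0)).1,
       ((pvFM (filt.filter (fun e => pvKey e == (t, s)))).getD (0, "", 0)).2.1) := by
  have hne : filt.filter (fun e => pvKey e == (t, s)) ≠ [] := by
    obtain ⟨e, he, hk⟩ := h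
    intro h0
    have : e ∈ filt.filter (fun e => pvKey e == (t, s)) :=
      List.mem_filter.mpr ⟨he, by simp [hk]⟩
    simp [h0] at this
  obtain ⟨e0, es, hcons⟩ := List.exists_cons_of_ne_nil hne
  have hpred : filt.filter (fun e => e.1 == t && e.2.1 == s)
      = filt.filter (fun e => pvKey e == (t, s)) := rfl
  simp only [pvWinner]
  rw [hpred, hcons, List.map_cons]
  have hval : (fun (e : String × String × Int × String × Int) =>
      ((e.2.2.1, e.2.2.2.1, e.2.2.2.2) : Int × String × Int)) = pvVal := rfl
  rw [hval]
  rw [show ((e0.2.2.1, e0.2.2.2.1, e0.2.2.2.2) : Int × String × Int) = pvVal e0 from rfl]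
  set F := (es.map pvVal).foldl pvUpd (pvVal e0) with hF
  have hmax : PySem.List.max? ((pvVal e0 :: es.map pvVal).map (fun e => e.2.2)) (fun y => y)
      = some F.2.2 := by
    rw [List.map_cons, PySem.List.max?_id_cons, hF, pv_fm_priority, ← List.foldl_map]
    simp [List.map_map, List.foldl_map]
  rw [hmax]
  simp only []
  have hfind : (pvVal e0 :: es.map pvVal).find? (fun e => e.2.2 == F.2.2) = some F :=
    pv_fm_find (es.map pvVal) (pvVal e0)
  rw [hfind]
  simp only []
  simp [pvFM, hF]

-- A's second loop on a list of (key, value) items, characterised declaratively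
theorem pv_group_items (its : List ((String × String) × (Int × String × Int))) :
    ((its.foldl (fun (m : PySem.Dict String (List (String × Int × String))) it =>
        m.modify it.1.1 [] (· ++ [(it.1.2, it.2.1, it.2.2.1)])) PySem.Dict.empty).items)
    = (PySem.Set.ofList (its.map (fun it => it.1.1))).map (fun t =>
        (t, (its.filter (fun it => it.1.1 == t)).map (fun it => (it.1.2, it.2.1, it.2.2.1)))) := by
  have hfold : its.foldl (fun (m : PySem.Dict String (List (String × Int × String))) it =>
        m.modify it.1.1 [] (· ++ [(it.1.2, it.2.1, it.2.2.1)])) PySem.Dict.empty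
      = (its.map (fun it => (it.1.1, (it.1.2, it.2.1, it.2.2.1)))).foldl
          (fun m p => m.modify p.1 [] (· ++ [p.2])) PySem.Dict.empty := by
    rw [List.foldl_map]
  rw [hfold]
  set cm := (its.map (fun it => (it.1.1, (it.1.2, it.2.1, it.2.2.1)))).foldl
      (fun (m : PySem.Dict String (List (String × Int × String))) p =>
        m.modify p.1 [] (· ++ [p.2])) PySem.Dict.empty with hcm
  have hkeys : cm.keys = PySem.Set.ofList (its.map (fun it => it.1.1)) := by
    rw [hcm]
    rw [PySem.Dict.keys_foldl_modify_key]
    rw [PySem.Dict.keys_empty, PySem.Set.update_nil_left, List.map_map]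
    rfl
  have hnd : cm.keys.Nodup := hkeys ▸ PySem.Set.nodup_ofList _
  have hget : ∀ t, cm.getD t []
      = (its.filter (fun it => it.1.1 == t)).map (fun it => (it.1.2, it.2.1, it.2.2.1)) := by
    intro t
    rw [hcm, PySem.Dict.getD_foldl_modify_append, PySem.Dict.getD_empty, List.nil_append]
    rw [List.filter_map, List.map_map]
    rfl
  rw [PySem.Dict.items_eq_map_keys cm hnd [], hkeys]
  exact List.map_congr_left (fun t _ => by rw [hget])

-- ===== VERDICT (by name: the statement is the Claim_ definition above) =====
theorem build_deduped_causal_map_py_spec : Claim_equal_build_deduped_causal_map_py := by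
  intro pairs kpis _
  unfold Spec_build_deduped_causal_map_py
  simp only [build_deduped_causal_map_py, build_deduped_causal_map_py_alt]
  rw [pv_foldA_eq_foldFilt]
  set filt := pvFilt pairs kpis with hfilt
  set B := filt.foldl pvBStep PySem.Dict.empty with hBdef
  have hkeys : B.keys = PySem.Set.ofList (filt.map pvKey) := pv_keys_foldBStep filt
  have hnd : B.keys.Nodup := hkeys ▸ PySem.Set.nodup_ofList _
  have hitems : B.items = (PySem.Set.ofList (filt.map pvKey)).map
      (fun k => (k, (pvFM (filt.filter (fun e => pvKey e == k))).getD (0, "", 0))) := by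
    rw [PySem.Dict.items_eq_map_keys B hnd (0, "", 0), hkeys]
    refine List.map_congr_left (fun k _ => ?_)
    rw [PySem.Dict.getD_eq_get?_getD, hBdef, pv_get?_foldBStep]
  rw [hitems, pv_group_items]
  have hpk : (fun (e : String × String × Int × String × Int) =>
      ((e.1, e.2.1) : String × String)) = pvKey := rfl
  rw [hpk]
  set K := PySem.Set.ofList (filt.map pvKey) with hK
  rw [List.map_map]
  have htg : (fun (it : (String × String) × (Int × String × Int)) => it.1.1) ∘
      (fun k => (k, (pvFM (filt.filter (fun e => pvKey e == k))).getD (0, "", 0)))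
      = fun (k : String × String) => k.1 := rfl
  rw [htg]
  refine List.map_congr_left (fun t _ => ?_)
  refine congrArg _ ?_
  rw [List.filter_map]
  have hpf : ((fun (it : (String × String) × (Int × String × Int)) => it.1.1 == t) ∘
      (fun k => (k, (pvFM (filt.filter (fun e => pvKey e == k))).getD (0, "", 0))))
      = fun (k : String × String) => k.1 == t := rfl
  rw [hpf, List.map_map]
  refine List.map_congr_left (fun k hk => ?_)
  have hkt : k.1 = t := by
    have := (List.mem_filter.mp hk).2
    exact eq_of_beq this
  have hmemK : k ∈ K := (List.mem_filter.mp hk).1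
  have hex : ∃ e ∈ filt, pvKey e = (t, k.2) := by
    rw [hK] at hmemK
    have := (PySem.Set.mem_ofList _ _).mp hmemK
    obtain ⟨e, he, hke⟩ := List.mem_map.mp this
    exact ⟨e, he, by rw [hke, ← hkt]⟩
  have hw := pv_winner_eq filt t k.2 hex
  rw [hw]
  have hkk : k = (t, k.2) := by rw [← hkt]
  rw [← hkk]
  simp
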